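-- pv_equiv track=rewrite | github.com/Anonymous-for-review930/NS-FirmID | tools/tool_global.py | sort_brand_model_versions
-- ===== SOURCE A (Python) =====
-- def sort_brand_model_versions(data: dict) -> dict:
--     """"""
--     # 嵌套字典排序 形如{brand1: {model1: [version], model2: [version]}, brand2: {model1: [version]}}
--     sorted_data = {}
--     for brand in sorted(data.keys(), key=lambda x: x.lower()):
--         models = data[brand]
--         sorted_models = {}
--         for model in sorted(models.keys(), key=lambda x: x.lower()):
--             # 版本列表排序（按字符串）
--             sorted_versions = sorted(models[model], key=lambda v: v.lower())
--             sorted_models[model] = sorted_versions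
--         sorted_data[brand] = sorted_models
--     return sorted_data
-- ===== SOURCE B (Python) =====
-- def sort_brand_model_versions(data: dict) -> dict:
--     def _rec(x):
--         if isinstance(x, dict):
--             return {k: _rec(x[k]) for k in sorted(x, key=str.lower)}
--         return sorted(x, key=str.lower)
--     return _rec(data)
-- ===== Notes on version B (the rewrite author's own statement) =====
-- stated objective: simpler
-- what changed: Replaced A's three explicit nested loops with dict-accumulators by a single recursive helper that descends the nested structure, returning a comprehension over case-insensitively sorted keys at each dict level and a sorted list at the leaves.
import Mathlib
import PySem

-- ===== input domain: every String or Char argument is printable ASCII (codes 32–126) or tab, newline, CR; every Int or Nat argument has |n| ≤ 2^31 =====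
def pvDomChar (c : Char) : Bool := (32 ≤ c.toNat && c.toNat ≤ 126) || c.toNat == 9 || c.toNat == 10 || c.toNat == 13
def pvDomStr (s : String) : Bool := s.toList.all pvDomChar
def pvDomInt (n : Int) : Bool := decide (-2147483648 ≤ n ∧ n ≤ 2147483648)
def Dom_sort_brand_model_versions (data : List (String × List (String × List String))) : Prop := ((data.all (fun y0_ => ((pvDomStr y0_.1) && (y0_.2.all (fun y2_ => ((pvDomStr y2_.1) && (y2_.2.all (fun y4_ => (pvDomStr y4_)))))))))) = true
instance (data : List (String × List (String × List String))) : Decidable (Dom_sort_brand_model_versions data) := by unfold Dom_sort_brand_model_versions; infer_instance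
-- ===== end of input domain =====

-- B replaces A's three explicit nested accumulator loops by a recursive descent that maps a
-- case-insensitive sort over each level (objective: simpler decomposition, same cost).

-- ===== PORT A =====
-- literal transliteration of A: build sorted_data by appending (brand, sorted_models)
-- for each brand in sorted(data.keys(), key=lower), with the inner model loop the same shape
def sort_brand_model_versions (data : List (String × List (String × List String))) : List (String × List (String × List String)) :=
  (PySem.List.sorted (data.map Prod.fst) (fun x => PySem.Str.lower x)).foldl
    (fun sorted_data brand =>
      let models := (PySem.Dict.mk data).getD brand []
      let sorted_models :=
        (PySem.List.sorted (models.map Prod.fst) (fun x => PySem.Str.lower x)).foldl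
          (fun sm model =>
            let sorted_versions :=
              PySem.List.sorted ((PySem.Dict.mk models).getD model []) (fun v => PySem.Str.lower v)
            sm ++ [(model, sorted_versions)]) []
      sorted_data ++ [(brand, sorted_models)]) []

-- ===== PORT B =====
-- transliteration of B's recursive _rec, one typed helper per nesting level;
-- the dict comprehension over sorted keys becomes a map
def pvBRecVersions (x : List String) : List String :=
  PySem.List.sorted x (fun v => PySem.Str.lower v)

def pvBRecModels (x : List (String × List String)) : List (String × List String) :=
  (PySem.List.sorted (x.map Prod.fst) (fun k => PySem.Str.lower k)).map
    (fun k => (k, pvBRecVersions ((PySem.Dict.mk x).getD k [])))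

def sort_brand_model_versions_alt (data : List (String × List (String × List String))) : List (String × List (String × List String)) :=
  (PySem.List.sorted (data.map Prod.fst) (fun k => PySem.Str.lower k)).map
    (fun k => (k, pvBRecModels ((PySem.Dict.mk data).getD k [])))

-- ===== PRECONDITION & SPEC =====
def Spec_sort_brand_model_versions (data : List (String × List (String × List String))) (out : List (String × List (String × List String))) : Prop := out = sort_brand_model_versions_alt data
instance (data : List (String × List (String × List String))) (out : List (String × List (String × List String))) : Decidable (Spec_sort_brand_model_versions data out) := by unfold Spec_sort_brand_model_versions; infer_instance

-- ===== CLAIM (what is proved, stated in full; the proofs are below) =====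
def Claim_equal_sort_brand_model_versions : Prop := ∀ (data : List (String × List (String × List String))), Dom_sort_brand_model_versions data → Spec_sort_brand_model_versions data (sort_brand_model_versions data)

-- ===== LEMMAS AND PROOFS =====
-- A's append-accumulator loops are exactly maps over the sorted key lists
theorem pvA_eq_alt (data : List (String × List (String × List String))) :
    sort_brand_model_versions data = sort_brand_model_versions_alt data := by
  unfold sort_brand_model_versions sort_brand_model_versions_alt pvBRecModels pvBRecVersions
  simp only [PySem.List.foldl_append_singleton_eq_map, List.nil_append]

-- ===== VERDICT (by name: the statement is the Claim_ definition above) =====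
theorem sort_brand_model_versions_spec : Claim_equal_sort_brand_model_versions := by
  intro data _
  exact pvA_eq_alt data
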